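-- pv_equiv track=rewrite | github.com/tanjingjing123/LeetcodeAlgorithms | wordProcessor.py | reflowAndJustify
-- ===== SOURCE A (Python) =====
-- def reflowAndJustify(lines, maxLen):
--     if not lines:
--         return []
--
--     words = []
--     words.extend(lines[0].split(' '))
--     for i in range(1, len(lines)):
--         words.extend(lines[i].split(' '))
--     result = []
--     i = 0
--     while i < len(words):
--         remain = maxLen
--         count = 0
--         while i < len(words):
--             if remain - len(words[i]) < 0:
--                 break
--             count += 1
--             remain -= len(words[i]) + 1
--             i += 1
--
--         line = words[i - count: i]
--         n = 0
--         for word in line: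
--             n += len(word)
--
--         reflowed = ''
--         baseDash = '-'
--         if len(line) == 1:
--             reflowed += line[0]
--         else:
--             times = (maxLen - n) // (len(line) - 1)
--             extra = (maxLen - n) % (len(line)-1)
--
--             for j in range(len(line)):
--                 if j == len(line) - 1:
--                     reflowed += line[j]
--                 else:
--                     if extra > 0:
--                         reflowed += line[j] + baseDash * times + '-'
--                         extra -= 1
--                     else:
--                         reflowed += line[j] + baseDash * times
--
--         result.append(reflowed)
--
--
--     return result
-- ===== SOURCE B (Python) =====
-- def reflowAndJustify(lines, maxLen):
--     # Prefix-sum + binary-search packing: T[k] = sum(len(w)+1) over the first k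
--     # words is strictly increasing, and a line starting at word i ends at the
--     # largest j with T[j] - T[i] <= maxLen + 1, found by binary search.
--     if not lines:
--         return []
--     words = []
--     for line in lines:
--         words.extend(line.split(' '))
--     N = len(words)
--     T = [0]
--     for w in words:
--         T.append(T[-1] + len(w) + 1)
--     result = []
--     i = 0
--     while i < N:
--         bound = T[i] + maxLen + 1
--         lo, hi = i + 1, N
--         while lo < hi:
--             mid = (lo + hi + 1) // 2
--             if T[mid] <= bound:
--                 lo = mid
--             else:
--                 hi = mid - 1
--         j = lo
--         group = words[i:j]
--         if j - i == 1:
--             result.append(group[0])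
--         else:
--             gaps = j - i - 1
--             n = (T[j] - T[i]) - (j - i)
--             times, extra = divmod(maxLen - n, gaps)
--             seps = ['-' * (times + 1)] * extra + ['-' * times] * (gaps - extra)
--             result.append(''.join(w + s for w, s in zip(group, seps)) + group[-1])
--         i = j
--     return result
-- ===== Notes on version B (the rewrite author's own statement) =====
-- stated objective: alternative
-- what changed: Replaces A's incremental remain/count inner rescan by a prefix-sum array T[k]=sum(len+1) with a binary search for each line's break point (largest j with T[j]-T[i] <= maxLen+1), computes the group's character count from the prefix sums instead of re-summing, and justifies by building an explicit separator list (['-'*(times+1)]*extra + ['-'*times]*rest) zipped with the words instead of A's mutable extra countdown loop; A never returns (infinite loop) when some word is longer than maxLen, which Pre_ excludes.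
import Mathlib
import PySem

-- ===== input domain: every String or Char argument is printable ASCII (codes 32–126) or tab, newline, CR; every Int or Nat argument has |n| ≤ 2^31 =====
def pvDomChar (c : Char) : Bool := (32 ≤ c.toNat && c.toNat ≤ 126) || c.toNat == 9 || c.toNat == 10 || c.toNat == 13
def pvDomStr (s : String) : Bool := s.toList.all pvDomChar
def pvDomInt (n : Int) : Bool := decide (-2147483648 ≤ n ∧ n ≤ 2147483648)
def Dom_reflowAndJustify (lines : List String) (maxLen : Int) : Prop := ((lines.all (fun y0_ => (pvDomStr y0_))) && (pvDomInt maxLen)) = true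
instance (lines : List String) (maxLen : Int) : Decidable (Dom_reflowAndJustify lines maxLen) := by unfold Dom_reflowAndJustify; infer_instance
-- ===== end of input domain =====

-- B replaces A's incremental remain/count packing loop by a prefix-sum array with a binary search
-- for each line break, and A's mutable `extra` countdown by an explicit separator list zipped with
-- the words; equal on Pre_ (A loops forever when a word is longer than maxLen).

-- Python's `'-' * n` (string repetition, exact: negative n gives ""); used by both ports.
def pvDashes (n : Int) : String := String.ofList (List.replicate n.toNat '-')

-- Python's `s.split(' ')` (the separator is the non-empty literal ' ', so split? is always `some`).
def pvSplitSpace (s : String) : List String := (PySem.Str.split? s " ").getD []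

-- ===== PORT A =====

-- inner `while` loop: state (remain, i, count); fuel only makes the recursion structural
-- (the loop advances i, bounded by words.length, so fuel = words.length always suffices).
def aInner (words : List String) : Nat → Int → Int → Int → Int × Int
  | 0, _, i, count => (i, count)
  | f + 1, remain, i, count =>
    if i < (words.length : Int) then
      if remain - PySem.Str.len (PySem.List.pyGetD words i "") < 0 then (i, count)
      else aInner words f (remain - (PySem.Str.len (PySem.List.pyGetD words i "") + 1)) (i + 1) (count + 1)
    else (i, count)

-- the body after the inner loop: n, reflowed (the j-loop folds state (reflowed, extra))
def aFormat (maxLen : Int) (line : List String) : String :=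
  let n := line.foldl (fun acc w => acc + PySem.Str.len w) 0
  if line.length = 1 then
    "" ++ PySem.List.pyGetD line 0 ""
  else
    let times := PySem.Int.floordiv (maxLen - n) ((line.length : Int) - 1)
    let extra := PySem.Int.mod (maxLen - n) ((line.length : Int) - 1)
    ((PySem.List.pyRange 0 (line.length : Int) 1).foldl
      (fun (st : String × Int) j =>
        if j = (line.length : Int) - 1 then (st.1 ++ PySem.List.pyGetD line j "", st.2)
        else if st.2 > 0 then (st.1 ++ PySem.List.pyGetD line j "" ++ pvDashes times ++ "-", st.2 - 1)
        else (st.1 ++ PySem.List.pyGetD line j "" ++ pvDashes times, st.2))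
      ("", extra)).1

-- outer `while i < len(words)` loop; A does not terminate when a word exceeds maxLen
-- (count = 0 and i never advances), so the port carries fuel: inside Pre_ every outer
-- iteration consumes at least one word, hence fuel = words.length + 1 suffices.
def aOuter (words : List String) (maxLen : Int) : Nat → Int → List String → List String
  | 0, _, result => result
  | f + 1, i, result =>
    if i < (words.length : Int) then
      let p := aInner words words.length maxLen i 0
      let line := PySem.List.slice words (some (p.1 - p.2)) (some p.1)
      aOuter words maxLen f p.1 (result ++ [aFormat maxLen line])
    else result

def reflowAndJustify (lines : List String) (maxLen : Int) : List String :=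
  if lines = [] then []
  else
    let words0 := pvSplitSpace (PySem.List.pyGetD lines 0 "")
    let words := (PySem.List.pyRange 1 (lines.length : Int) 1).foldl
      (fun acc i => acc ++ pvSplitSpace (PySem.List.pyGetD lines i "")) words0
    aOuter words maxLen (words.length + 1) 0 []

-- ===== PORT B =====

-- `T.append(T[-1] + len(w) + 1)` step of the prefix-sum build
def bStepT (t : List Int) (w : String) : List Int :=
  t ++ [PySem.List.pyGetD t (-1) 0 + PySem.Str.len w + 1]

-- Python's ''.join(parts)
def bJoin (parts : List String) : String := parts.foldl (· ++ ·) ""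

-- the inner `while lo < hi` binary search; fuel = T.length always suffices (hi - lo shrinks)
def bBisect (T : List Int) (bound : Int) : Nat → Int → Int → Int
  | 0, lo, _ => lo
  | f + 1, lo, hi =>
    if lo < hi then
      let mid := PySem.Int.floordiv (lo + hi + 1) 2
      if PySem.List.pyGetD T mid 0 ≤ bound then bBisect T bound f mid hi
      else bBisect T bound f lo (mid - 1)
    else lo

-- outer `while i < N` loop of B; fuel = words.length + 1 suffices inside Pre_
def bOuter (words : List String) (T : List Int) (maxLen : Int) : Nat → Int → List String → List String
  | 0, _, res => res
  | f + 1, i, res =>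
    if i < (words.length : Int) then
      let bound := PySem.List.pyGetD T i 0 + maxLen + 1
      let j := bBisect T bound T.length (i + 1) (words.length : Int)
      let group := PySem.List.slice words (some i) (some j)
      let res' :=
        if j - i = 1 then res ++ [PySem.List.pyGetD group 0 ""]
        else
          let gaps := j - i - 1
          let n := (PySem.List.pyGetD T j 0 - PySem.List.pyGetD T i 0) - (j - i)
          let times := PySem.Int.floordiv (maxLen - n) gaps
          let extra := PySem.Int.mod (maxLen - n) gaps
          let seps := List.replicate extra.toNat (pvDashes (times + 1))
            ++ List.replicate (gaps - extra).toNat (pvDashes times)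
          res ++ [bJoin ((group.zip seps).map (fun p => p.1 ++ p.2)) ++ PySem.List.pyGetD group (-1) ""]
      bOuter words T maxLen f j res'
    else res

def reflowAndJustify_alt (lines : List String) (maxLen : Int) : List String :=
  if lines = [] then []
  else
    let words := lines.foldl (fun acc l => acc ++ pvSplitSpace l) []
    let T := words.foldl bStepT [0]
    bOuter words T maxLen (words.length + 1) 0 []

-- ===== PRECONDITION & SPEC =====
-- Pre_ excludes exactly the inputs on which A never returns: if any word (piece of a
-- split-on-space line) is longer than maxLen, A's packing loop stops advancing and loops forever.
def Pre_reflowAndJustify (lines : List String) (maxLen : Int) : Prop :=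
  ∀ l ∈ lines, ∀ w ∈ pvSplitSpace l, PySem.Str.len w ≤ maxLen

instance (lines : List String) (maxLen : Int) : Decidable (Pre_reflowAndJustify lines maxLen) := by
  unfold Pre_reflowAndJustify; infer_instance

def pvWitness_reflowAndJustify : List String × Int := (["ab cd e", "fgh"], 5)

def Spec_reflowAndJustify (lines : List String) (maxLen : Int) (out : List String) : Prop := out = reflowAndJustify_alt lines maxLen
instance (lines : List String) (maxLen : Int) (out : List String) : Decidable (Spec_reflowAndJustify lines maxLen out) := by unfold Spec_reflowAndJustify; infer_instance

-- ===== CLAIM (what is proved, stated in full; the proofs are below) =====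
def Claim_equal_reflowAndJustify : Prop := ∀ (lines : List String) (maxLen : Int), Dom_reflowAndJustify lines maxLen → Pre_reflowAndJustify lines maxLen → Spec_reflowAndJustify lines maxLen (reflowAndJustify lines maxLen)

-- ===== LEMMAS AND PROOFS =====

-- proof-internal recursive view of greedy packing: bTakeFit ws r takes the words fitting budget r
def bTakeFit : List String → Int → List String × List String
  | [], _ => ([], [])
  | w :: ws, remain =>
    if PySem.Str.len w ≤ remain then
      let r := bTakeFit ws (remain - (PySem.Str.len w + 1))
      (w :: r.1, r.2)
    else ([], w :: ws)

theorem bTakeFit_rest_le (ws : List String) (r : Int) : (bTakeFit ws r).2.length ≤ ws.length := by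
  induction ws generalizing r with
  | nil => simp [bTakeFit]
  | cons w ws ih =>
    simp only [bTakeFit]
    split
    · exact Nat.le_succ_of_le (ih _)
    · simp

-- proof-internal recursive packer (both ports' packing phases are shown to produce it)
def bPack : List String → Int → List (List String)
  | [], _ => []
  | w :: ws, maxLen =>
    let r := bTakeFit ws (maxLen - (PySem.Str.len w + 1))
    (w :: r.1) :: bPack r.2 maxLen
termination_by ws _ => ws.length
decreasing_by exact Nat.lt_succ_of_le (bTakeFit_rest_le _ _)

-- proof-internal common form of one justified line
def jFormat (group : List String) (maxLen : Int) : String :=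
  if group.length = 1 then PySem.List.pyGetD group 0 ""
  else
    let gaps := (group.length : Int) - 1
    let n := (group.map PySem.Str.len).sum
    let times := PySem.Int.floordiv (maxLen - n) gaps
    let extra := PySem.Int.mod (maxLen - n) gaps
    bJoin ((group.dropLast.zipIdx).map
      (fun p => p.1 ++ pvDashes (times + (if (p.2 : Int) < extra then 1 else 0))))
      ++ PySem.List.pyGetD group (-1) ""

theorem words_eq (l0 : String) (rest : List String) :
    (PySem.List.pyRange 1 ((l0 :: rest).length : Int) 1).foldl
      (fun acc i => acc ++ pvSplitSpace (PySem.List.pyGetD (l0 :: rest) i ""))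
      (pvSplitSpace (PySem.List.pyGetD (l0 :: rest) 0 "")) = (l0 :: rest).flatMap pvSplitSpace := by
  have h1 : ((l0 :: rest).length : Int) = PySem.List.len (l0 :: rest) := by simp [PySem.List.len]
  rw [h1]
  rw [PySem.List.foldl_pyRange_pyGetD (l0 :: rest) "" (fun acc l => acc ++ pvSplitSpace l) _ (by omega : (0:Int) ≤ 1)]
  rw [PySem.List.foldl_append_eq_flatMap]
  simp [PySem.List.pyGetD_zero_cons]

theorem bTakeFit_append (ws : List String) (r : Int) :
    (bTakeFit ws r).1 ++ (bTakeFit ws r).2 = ws := by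
  induction ws generalizing r with
  | nil => simp [bTakeFit]
  | cons w ws ih =>
    simp only [bTakeFit]
    split
    · simpa using ih _
    · simp

theorem inner_eq (ws : List String) : ∀ (pre : List String) (remain count : Int) (f : Nat), ws.length ≤ f →
    aInner (pre ++ ws) f remain (pre.length : Int) count
      = ((pre.length : Int) + ((bTakeFit ws remain).1.length : Int),
         count + ((bTakeFit ws remain).1.length : Int)) := by
  induction ws with
  | nil =>
    intro pre remain count f _
    cases f with
    | zero => simp [aInner, bTakeFit]
    | succ f => simp [aInner, bTakeFit]
  | cons w ws ih =>
    intro pre remain count f hf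
    cases f with
    | zero => simp at hf
    | succ f =>
      have hi : (pre.length : Int) < ((pre ++ w :: ws).length : Int) := by simp
      have hget : PySem.List.pyGetD (pre ++ w :: ws) (pre.length : Int) "" = w := by
        simp [PySem.List.pyGetD_natCast, List.getD_eq_getElem?_getD]
      simp only [aInner, if_pos hi, hget]
      by_cases hfit : PySem.Str.len w ≤ remain
      · rw [if_neg (by omega)]
        have hstep : (pre.length : Int) + 1 = ((pre ++ [w]).length : Int) := by simp
        rw [hstep]
        have hrec := ih (pre ++ [w]) (remain - (PySem.Str.len w + 1)) (count + 1) f (by simpa using hf)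
        rw [List.append_assoc] at hrec
        simp only [List.singleton_append] at hrec
        rw [hrec]
        simp only [bTakeFit, if_pos hfit]
        simp
        constructor <;> omega
      · rw [if_pos (by omega)]
        simp only [bTakeFit, if_neg hfit]
        simp

theorem bTakeFit_budget (ws : List String) (r : Int) :
    (((bTakeFit ws r).1.map PySem.Str.len).sum + ((bTakeFit ws r).1.length : Int) ≤ r + 1)
      ∨ (bTakeFit ws r).1 = [] := by
  induction ws generalizing r with
  | nil => right; simp [bTakeFit]
  | cons w ws ih =>
    by_cases h : PySem.Str.len w ≤ r
    · left
      simp only [bTakeFit, if_pos h, List.map_cons, List.sum_cons, List.length_cons]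
      rcases ih (r - (PySem.Str.len w + 1)) with hb | he
      · simp only [PySem.Str.len_eq] at h hb ⊢
        push_cast at hb ⊢
        omega
      · rw [he]
        simp only [List.map_nil, List.sum_nil, List.length_nil, PySem.Str.len_eq] at h ⊢
        push_cast
        omega
    · right
      simp only [bTakeFit, if_neg h]

theorem pvDashes_succ (t : Int) (ht : 0 ≤ t) : pvDashes t ++ "-" = pvDashes (t + 1) := by
  have h1 : "-" = String.ofList ['-'] := by decide
  rw [h1, pvDashes, pvDashes, ← String.ofList_append]
  have h2 : (t + 1).toNat = t.toNat + 1 := by omega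
  rw [h2, List.replicate_succ']

theorem foldl_range_get {β : Type} (full : List String) (d : String) (F : β → Int → String → β) :
    ∀ (a : Nat) (init : β), a ≤ full.length →
    (PySem.List.pyRange (a : Int) (full.length : Int) 1).foldl
        (fun st j => F st j (PySem.List.pyGetD full j d)) init
      = ((full.drop a).zipIdx a).foldl (fun st p => F st (p.2 : Int) p.1) init := by
  intro a
  induction h : full.length - a generalizing a with
  | zero =>
    intro init ha
    have he : full.length = a := by omega
    rw [PySem.List.pyRange_one_eq_nil (by omega)]
    rw [List.drop_eq_nil_of_le (by omega)]
    simp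
  | succ n ih =>
    intro init ha
    have hlt : a < full.length := by omega
    rw [PySem.List.pyRange_one_cons (by exact_mod_cast hlt)]
    rw [List.drop_eq_getElem_cons hlt, List.zipIdx_cons]
    simp only [List.foldl_cons]
    have hget : PySem.List.pyGetD full (a : Int) d = full[a] := by
      simp [PySem.List.pyGetD_natCast, List.getD_eq_getElem?_getD, List.getElem?_eq_getElem hlt]
    rw [hget]
    have hcast : ((a : Int) + 1) = ((a + 1 : Nat) : Int) := by push_cast; ring
    rw [hcast]
    exact ih (a + 1) (by omega) _ (by omega)

theorem bJoin_cons (x : String) (xs : List String) : bJoin (x :: xs) = x ++ bJoin xs := by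
  have key : ∀ (ys : List String) (s : String), ys.foldl (· ++ ·) s = s ++ ys.foldl (· ++ ·) "" := by
    intro ys
    induction ys with
    | nil => simp [List.foldl]
    | cons y ys ih =>
      intro s
      simp only [List.foldl]
      rw [ih (s ++ y), ih ("" ++ y), String.append_assoc, String.empty_append]
  simp only [bJoin, List.foldl]
  rw [key xs ("" ++ x), String.empty_append]

theorem partFold (Lm1 extra0 times : Int) (htimes : 0 ≤ times) (_hex : 0 ≤ extra0) :
    ∀ (ys : List String) (a : Nat) (s : String), ((a : Int) + ys.length ≤ Lm1) →
    (ys.zipIdx a).foldl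
        (fun (st : String × Int) p =>
          if (p.2 : Int) = Lm1 then (st.1 ++ p.1, st.2)
          else if st.2 > 0 then (st.1 ++ p.1 ++ pvDashes times ++ "-", st.2 - 1)
          else (st.1 ++ p.1 ++ pvDashes times, st.2))
        (s, extra0 - min (a : Int) extra0)
      = (s ++ bJoin ((ys.zipIdx a).map
            (fun p => p.1 ++ pvDashes (times + (if (p.2 : Int) < extra0 then 1 else 0)))),
         extra0 - min ((a : Int) + ys.length) extra0) := by
  intro ys
  induction ys with
  | nil => intro a s _; simp [bJoin, String.append_empty]
  | cons y ys ih =>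
    intro a s hb
    rw [List.zipIdx_cons]
    simp only [List.foldl_cons, List.map_cons]
    rw [bJoin_cons]
    have hne : ((a : Int)) ≠ Lm1 := by simp at hb; omega
    rw [if_neg hne]
    by_cases hlt : (a : Int) < extra0
    · rw [if_pos (by omega), if_pos hlt]
      have e1 : extra0 - min (a : Int) extra0 - 1 = extra0 - min ((a : Int) + 1) extra0 := by omega
      have s1 : s ++ y ++ pvDashes times ++ "-" = s ++ (y ++ pvDashes (times + 1)) := by
        rw [String.append_assoc, String.append_assoc, pvDashes_succ times htimes]
      rw [e1, s1]
      have hcast : ((a : Int) + 1) = ((a + 1 : Nat) : Int) := by push_cast; ring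
      rw [hcast]
      rw [ih (a + 1) (s ++ (y ++ pvDashes (times + 1))) (by simp only [List.length_cons] at hb; push_cast at hb ⊢; omega)]
      simp only [Prod.mk.injEq]
      refine ⟨by rw [String.append_assoc], ?_⟩
      simp only [List.length_cons]; push_cast; congr 1; omega
    · rw [if_neg (by omega), if_neg hlt]
      have e1 : extra0 - min (a : Int) extra0 = extra0 - min ((a : Int) + 1) extra0 := by omega
      have s1 : s ++ y ++ pvDashes times = s ++ (y ++ pvDashes (times + 0)) := by
        rw [String.append_assoc]; norm_num
      rw [e1, s1]
      have hcast : ((a : Int) + 1) = ((a + 1 : Nat) : Int) := by push_cast; ring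
      rw [hcast]
      rw [ih (a + 1) (s ++ (y ++ pvDashes (times + 0))) (by simp only [List.length_cons] at hb; push_cast at hb ⊢; omega)]
      simp only [Prod.mk.injEq]
      refine ⟨by norm_num; rw [String.append_assoc], ?_⟩
      simp only [List.length_cons]; push_cast; congr 1; omega

theorem sum_foldl_len (g : List String) :
    g.foldl (fun acc w => acc + PySem.Str.len w) 0 = (g.map PySem.Str.len).sum := by
  have key : ∀ (ys : List String) (a : Int), ys.foldl (fun acc w => acc + PySem.Str.len w) a = a + (ys.map PySem.Str.len).sum := by
    intro ys
    induction ys with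
    | nil => simp
    | cons y ys ih => intro a; rw [List.foldl_cons, ih (a + PySem.Str.len y), List.map_cons, List.sum_cons]; ring
  simpa using key g 0

theorem format_eq (g : List String) (maxLen : Int) (hne : g ≠ [])
    (hbud : ((g.map PySem.Str.len).sum + ((g.length : Int) - 1) ≤ maxLen) ∨ g.length = 1) :
    aFormat maxLen g = jFormat g maxLen := by
  by_cases h1 : g.length = 1
  · simp only [aFormat, jFormat, if_pos h1, String.empty_append]
  · -- L ≥ 2
    have hL2 : 2 ≤ g.length := by
      cases g with
      | nil => simp at hne
      | cons x xs => cases xs with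
        | nil => simp at h1
        | cons y ys => simp
    have hbud' : (g.map PySem.Str.len).sum + ((g.length : Int) - 1) ≤ maxLen := by
      rcases hbud with h | h
      · exact h
      · omega
    simp only [aFormat, jFormat, if_neg h1]
    rw [sum_foldl_len]
    set n := (g.map PySem.Str.len).sum with hn
    set gaps : Int := (g.length : Int) - 1 with hgaps
    have hgaps_pos : 0 < gaps := by rw [hgaps]; omega
    set times := PySem.Int.floordiv (maxLen - n) gaps with htimes
    set extra := PySem.Int.mod (maxLen - n) gaps with hextra
    have hn0 : 0 ≤ maxLen - n := by omega
    have htimes0 : 0 ≤ times := by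
      rw [htimes]
      exact (PySem.Int.le_floordiv_iff_mul_le hgaps_pos).mpr (by omega)
    have hex0 : 0 ≤ extra := PySem.Int.mod_nonneg _ hgaps_pos
    -- decompose g
    obtain ⟨ys, z, rfl⟩ : ∃ ys z, g = ys ++ [z] := ⟨g.dropLast, g.getLast hne, by simp [List.dropLast_append_getLast hne]⟩
    set g := ys ++ [z] with hg
    have hbridge := foldl_range_get g ""
      (fun st j x =>
        if j = ((g.length : Int)) - 1 then (st.1 ++ x, st.2)
        else if st.2 > 0 then (st.1 ++ x ++ pvDashes times ++ "-", st.2 - 1)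
        else (st.1 ++ x ++ pvDashes times, st.2)) 0 (("", extra)) (by omega)
    simp only [Nat.cast_zero, List.drop_zero] at hbridge
    rw [hbridge]
    have hLys : ((ys.length : Int)) = (g.length : Int) - 1 := by rw [hg]; simp
    rw [hg, List.zipIdx_append, List.foldl_append]
    simp only [List.zipIdx_cons, Nat.zero_add, List.zipIdx_nil]
    have hinit : extra = extra - min ((0 : Nat) : Int) extra := by omega
    rw [hinit, partFold ((g.length : Int) - 1) extra times htimes0 hex0 ys 0 "" (by omega)]
    simp only [List.foldl_cons, List.foldl_nil]
    rw [if_pos (by rw [← hg]; omega)]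
    rw [← hinit]
    simp only [String.empty_append, List.dropLast_concat,
      PySem.List.pyGetD_neg_one_append_singleton]

theorem outer_eq (maxLen : Int) : ∀ (f : Nat) (suf pre res : List String),
    (∀ w ∈ suf, PySem.Str.len w ≤ maxLen) → suf.length < f →
    aOuter (pre ++ suf) maxLen f (pre.length : Int) res
      = res ++ (bPack suf maxLen).map (fun g => jFormat g maxLen) := by
  intro f
  induction f with
  | zero => intro suf pre res _ hf; omega
  | succ f ih =>
    intro suf pre res hpre hf
    cases suf with
    | nil =>
      simp only [aOuter]
      rw [if_neg (by simp)]
      simp [bPack]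
    | cons w rest =>
      have hfit : PySem.Str.len w ≤ maxLen := hpre w (by simp)
      have hin := inner_eq (w :: rest) pre maxLen 0 (pre ++ w :: rest).length (by simp)
      set t := bTakeFit rest (maxLen - (PySem.Str.len w + 1)) with ht
      have hsplit : bTakeFit (w :: rest) maxLen = (w :: t.1, t.2) := by
        simp only [bTakeFit, if_pos hfit, ht]
      set grp : List String := w :: t.1 with hgrp
      set k : Nat := grp.length with hk
      have hk1 : (bTakeFit (w :: rest) maxLen).1.length = k := by rw [hsplit]
      rw [hk1] at hin
      have happ : grp ++ t.2 = w :: rest := by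
        have := bTakeFit_append (w :: rest) maxLen
        rwa [hsplit] at this
      simp only [aOuter]
      rw [if_pos (by simp)]
      rw [hin]
      have e1 : ((pre.length : Int) + (k : Int) - (0 + (k : Int))) = ((pre.length : Nat) : Int) := by ring
      rw [e1]
      have e2 : ((pre.length : Int) + (k : Int)) = (((pre.length + k : Nat)) : Int) := by push_cast; ring
      rw [e2]
      have hslice : PySem.List.slice (pre ++ w :: rest) (some ((pre.length : Nat) : Int))
          (some (((pre.length + k : Nat)) : Int)) = grp := by
        have h3 : ((pre.length + k : Nat) : Int) = ((pre.length : Nat) : Int) + ((k : Nat) : Int) := by push_cast; ring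
        rw [h3, PySem.List.slice_natCast_add]
        rw [List.drop_left]
        rw [← happ, hk]
        exact List.take_left
      rw [hslice]
      have hpre2 : (pre ++ grp).length = pre.length + k := by simp [hk]
      have happ2 : (pre ++ grp) ++ t.2 = pre ++ w :: rest := by rw [List.append_assoc, happ]
      have hrec := ih t.2 (pre ++ grp) (res ++ [aFormat maxLen grp])
        (by intro x hx
            apply hpre
            rw [← happ]
            exact List.mem_append_right _ hx)
        (by have h4 := bTakeFit_rest_le rest (maxLen - (PySem.Str.len w + 1))
            rw [← ht] at h4
            simp only [List.length_cons] at hf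
            omega)
      rw [happ2, hpre2] at hrec
      rw [hrec]
      have hfmt : aFormat maxLen grp = jFormat grp maxLen := by
        apply format_eq _ _ (by simp [hgrp])
        by_cases hg1 : grp.length = 1
        · right; exact hg1
        · left
          rcases bTakeFit_budget (w :: rest) maxLen with hb | he
          · simp only [hsplit] at hb
            omega
          · simp [hsplit, hgrp] at he
      have hpk : bPack (w :: rest) maxLen = grp :: bPack t.2 maxLen := by
        simp only [bPack, ← ht, ← hgrp]
      rw [hpk, hfmt]
      simp

-- ========== B-side lemmas ==========

-- Csum ws k = sum of (len+1) over the first k words (the prefix sums B stores in T)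
def Csum (ws : List String) (k : Nat) : Int :=
  ((ws.take k).map (fun w => PySem.Str.len w + 1)).sum

theorem Csum_nonneg (ws : List String) (k : Nat) : 0 ≤ Csum ws k := by
  unfold Csum
  induction ws.take k with
  | nil => simp
  | cons w t ih =>
    simp only [List.map_cons, List.sum_cons]
    have := PySem.Str.len_eq w
    have : 0 ≤ PySem.Str.len w := by rw [PySem.Str.len_eq]; positivity
    omega

theorem Csum_add (ws : List String) (a b : Nat) :
    Csum ws (a + b) = Csum ws a + Csum (ws.drop a) b := by
  unfold Csum
  rw [List.take_add, List.map_append, List.sum_append]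

theorem Csum_mono (ws : List String) {a b : Nat} (h : a ≤ b) : Csum ws a ≤ Csum ws b := by
  have : b = a + (b - a) := by omega
  rw [this, Csum_add]
  have := Csum_nonneg (ws.drop a) (b - a)
  omega

theorem Csum_ge (ws : List String) (k : Nat) (h : k ≤ ws.length) : (k : Int) ≤ Csum ws k := by
  induction ws generalizing k with
  | nil => simp_all [Csum]
  | cons w t ih =>
    cases k with
    | zero => simp [Csum]
    | succ k =>
      have hw : 0 ≤ PySem.Str.len w := by rw [PySem.Str.len_eq]; positivity
      have := ih k (by simpa using h)
      simp only [Csum, List.take_succ_cons, List.map_cons, List.sum_cons] at *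
      push_cast
      omega

theorem Csum_strict (ws : List String) {a b : Nat} (h : a < b) (hb : b ≤ ws.length) :
    Csum ws a < Csum ws b := by
  have : b = a + (b - a) := by omega
  rw [this, Csum_add]
  have h1 : ((b - a : Nat) : Int) ≤ Csum (ws.drop a) (b - a) :=
    Csum_ge _ _ (by simp; omega)
  omega

-- the prefix-sum list B builds is exactly the table of Csum
theorem T_build (ws : List String) :
    ws.foldl bStepT [0] = (List.range (ws.length + 1)).map (fun k => Csum ws k) := by
  induction ws using List.reverseRecOn with
  | nil => simp [Csum]
  | append_singleton ws w ih =>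
    rw [List.foldl_append, ih]
    simp only [List.foldl_cons, List.foldl_nil, bStepT]
    have hne : (List.range (ws.length + 1)).map (fun k => Csum ws k) ≠ [] := by simp
    have hlast : PySem.List.pyGetD ((List.range (ws.length + 1)).map (fun k => Csum ws k)) (-1) 0
        = Csum ws ws.length := by
      rw [PySem.List.pyGetD_neg_one _ _ hne]
      rw [List.getLast_eq_getElem]
      simp
    rw [hlast]
    have hlen : (ws ++ [w]).length + 1 = (ws.length + 1) + 1 := by simp
    rw [hlen]
    conv_rhs => rw [List.range_succ]
    rw [List.map_append]
    congr 1
    · apply List.map_congr_left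
      intro k hk
      simp only [List.mem_range] at hk
      unfold Csum
      rw [List.take_append_of_le_length (by omega)]
    · simp only [List.map_cons, List.map_nil]
      congr 1
      unfold Csum
      have h1 : ws.length + 1 = (ws ++ [w]).length := by simp
      rw [h1, List.take_length, List.take_length, List.map_append, List.sum_append]
      simp [add_assoc]

theorem T_get (ws : List String) (k : Int) (h0 : 0 ≤ k) (hk : k ≤ (ws.length : Int)) :
    PySem.List.pyGetD ((List.range (ws.length + 1)).map (fun j => Csum ws j)) k 0
      = Csum ws k.toNat := by
  have hc : k = ((k.toNat : Nat) : Int) := by omega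
  rw [hc, PySem.List.pyGetD_natCast]
  have hlt : k.toNat < ws.length + 1 := by omega
  rw [List.getD_eq_getElem?_getD]
  simp only [List.getElem?_map, List.getElem?_range, hlt, Option.map_some]
  simp
  congr 1
  omega

-- correctness of B's binary search: with T strictly increasing on [0,N], from a state
-- whose invariants hold it lands on the greatest index j ≤ hi with T[j] ≤ bound
theorem bisect_go (T : List Int) (bound N : Int)
    (hmono : ∀ a b : Int, 0 ≤ a → a < b → b ≤ N →
      PySem.List.pyGetD T a 0 < PySem.List.pyGetD T b 0) :
    ∀ (f : Nat) (lo hi : Int), 0 ≤ lo → lo ≤ hi → hi ≤ N → (hi - lo).toNat ≤ f →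
    PySem.List.pyGetD T lo 0 ≤ bound →
    (∀ k : Int, hi < k → k ≤ N → bound < PySem.List.pyGetD T k 0) →
    (lo ≤ bBisect T bound f lo hi ∧ bBisect T bound f lo hi ≤ hi ∧
      PySem.List.pyGetD T (bBisect T bound f lo hi) 0 ≤ bound ∧
      (∀ k : Int, bBisect T bound f lo hi < k → k ≤ N →
        bound < PySem.List.pyGetD T k 0)) := by
  intro f
  induction f with
  | zero =>
    intro lo hi h0 hlh hhN hf hlow hhigh
    have : lo = hi := by omega
    subst this
    simp only [bBisect]
    exact ⟨le_refl _, le_refl _, hlow, hhigh⟩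
  | succ f ih =>
    intro lo hi h0 hlh hhN hf hlow hhigh
    by_cases hlt : lo < hi
    · simp only [bBisect, if_pos hlt]
      set mid := PySem.Int.floordiv (lo + hi + 1) 2 with hmid
      have hmid_lo : lo + 1 ≤ mid := by
        rw [hmid]
        exact (PySem.Int.le_floordiv_iff_mul_le (by omega)).mpr (by omega)
      have hmid_hi : mid ≤ hi := by
        have : mid < hi + 1 := by
          rw [hmid]
          exact (PySem.Int.floordiv_lt_iff_lt_mul (by omega)).mpr (by omega)
        omega
      by_cases hc : PySem.List.pyGetD T mid 0 ≤ bound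
      · rw [if_pos hc]
        exact ⟨by
          have := (ih mid hi (by omega) (by omega) hhN (by omega) hc hhigh).1
          omega,
          (ih mid hi (by omega) (by omega) hhN (by omega) hc hhigh).2⟩
      · rw [if_neg hc]
        have hhigh' : ∀ k : Int, mid - 1 < k → k ≤ N → bound < PySem.List.pyGetD T k 0 := by
          intro k hk hkN
          have hbm : bound < PySem.List.pyGetD T mid 0 := lt_of_not_ge hc
          rcases eq_or_lt_of_le (show mid ≤ k by omega) with he | hl
          · rw [← he]; exact hbm
          · exact lt_trans hbm (hmono mid k (by omega) hl hkN)
        have hres := ih lo (mid - 1) h0 (by omega) (by omega) (by omega) hlow hhigh'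
        exact ⟨hres.1, by omega, hres.2.2⟩
    · simp only [bBisect, if_neg hlt]
      exact ⟨le_refl _, hlh, hlow, fun k hk hkN => hhigh k (by omega) hkN⟩

-- characterization of the greedy take: its length m is the unique cut with
-- Csum m ≤ r+1 (unless m = 0) and Csum (m+1) > r+1 (unless everything fits)
theorem Csum_cons_succ (w : String) (ws : List String) (k : Nat) :
    Csum (w :: ws) (k + 1) = (PySem.Str.len w + 1) + Csum ws k := by
  simp [Csum, List.take_succ_cons]

theorem takeFit_spec (ws : List String) (r : Int) :
    ((bTakeFit ws r).1.length = 0 ∨ Csum ws (bTakeFit ws r).1.length ≤ r + 1) ∧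
    ((bTakeFit ws r).1.length < ws.length → r + 1 < Csum ws ((bTakeFit ws r).1.length + 1)) := by
  induction ws generalizing r with
  | nil => simp [bTakeFit]
  | cons w ws ih =>
    by_cases h : PySem.Str.len w ≤ r
    · simp only [bTakeFit, if_pos h, List.length_cons]
      obtain ⟨ha, hb⟩ := ih (r - (PySem.Str.len w + 1))
      set m' := (bTakeFit ws (r - (PySem.Str.len w + 1))).1.length with hm'
      constructor
      · right
        rw [Csum_cons_succ]
        rcases ha with h0 | hle
        · rw [h0]
          have := Csum_nonneg ws 0
          have h00 : Csum ws 0 = 0 := by simp [Csum]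
          omega
        · omega
      · intro hlt
        have hlt' : m' < ws.length := by simpa using hlt
        have := hb hlt'
        rw [Csum_cons_succ]
        omega
    · simp only [bTakeFit, if_neg h, List.length_nil]
      constructor
      · left
        simp
      · intro _
        rw [show (0 : Nat) + 1 = 1 from rfl]
        have h1 : Csum (w :: ws) 1 = (PySem.Str.len w + 1) + Csum ws 0 := Csum_cons_succ w ws 0
        have h0 : Csum ws 0 = 0 := by simp [Csum]
        omega

theorem take_drop_of_append {α : Type} {l a b : List α} (h : a ++ b = l) :
    a = l.take a.length ∧ b = l.drop a.length := by
  subst h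
  exact ⟨List.take_left.symm, List.drop_left.symm⟩

theorem takeFit_take (ws : List String) (r : Int) :
    (bTakeFit ws r).1 = ws.take (bTakeFit ws r).1.length :=
  (take_drop_of_append (bTakeFit_append ws r)).1

theorem takeFit_drop (ws : List String) (r : Int) :
    (bTakeFit ws r).2 = ws.drop (bTakeFit ws r).1.length :=
  (take_drop_of_append (bTakeFit_append ws r)).2

theorem takeFit_len_le (ws : List String) (r : Int) :
    (bTakeFit ws r).1.length ≤ ws.length := by
  have h := congrArg List.length (bTakeFit_append ws r)
  simp only [List.length_append] at h
  omega

-- sum of (len+1) over a list = sum of len + length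
theorem lenplus_sum (g : List String) :
    (g.map (fun w => PySem.Str.len w + 1)).sum = (g.map PySem.Str.len).sum + g.length := by
  induction g with
  | nil => simp
  | cons w t ih =>
    simp only [List.map_cons, List.sum_cons, List.length_cons, ih]
    push_cast
    ring

-- the separator list B builds is the per-index dash table of jFormat
theorem seps_eq (n : Nat) (times extra : Int) (h0 : 0 ≤ extra) (hle : extra ≤ (n : Int)) :
    List.replicate extra.toNat (pvDashes (times + 1))
        ++ List.replicate ((n : Int) - extra).toNat (pvDashes times)
      = (List.range n).map (fun (k : Nat) => pvDashes (times + if (k : Int) < extra then 1 else 0)) := by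
  apply List.ext_getElem
  · simp; omega
  · intro k h1 h2
    simp only [List.getElem_map, List.getElem_range]
    rw [List.getElem_append]
    split
    · next h =>
      simp only [List.getElem_replicate]
      simp only [List.length_replicate] at h
      rw [if_pos (by omega)]
    · next h =>
      simp only [List.getElem_replicate]
      simp only [List.length_replicate] at h
      rw [if_neg (by omega)]
      simp

-- zipping with the table over range = zipIdx
theorem zipjoin (ys : List String) (F : Nat → String) :
    (ys.zip ((List.range ys.length).map F)).map (fun p => p.1 ++ p.2)
      = (ys.zipIdx).map (fun p => p.1 ++ F p.2) := by
  rw [List.zip_map_right, List.zipIdx_eq_zip_range', ← List.range_eq_range', List.map_map]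
  rfl

-- one step of B's loop produces jFormat of the greedy group
theorem bOuter_eq (words : List String) (maxLen : Int)
    (hfit : ∀ w ∈ words, PySem.Str.len w ≤ maxLen) :
    ∀ (f : Nat) (pre suf res : List String), pre ++ suf = words → suf.length < f →
    bOuter words ((List.range (words.length + 1)).map (fun k => Csum words k)) maxLen f
        ((pre.length : Nat) : Int) res
      = res ++ (bPack suf maxLen).map (fun g => jFormat g maxLen) := by
  set T := (List.range (words.length + 1)).map (fun k => Csum words k) with hT
  set N : Int := (words.length : Int) with hN
  have hTlen : T.length = words.length + 1 := by simp [hT]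
  have hmono : ∀ a b : Int, 0 ≤ a → a < b → b ≤ N →
      PySem.List.pyGetD T a 0 < PySem.List.pyGetD T b 0 := by
    intro a b ha hab hbN
    rw [hT, T_get words a ha (by omega), T_get words b (by omega) hbN]
    exact Csum_strict words (by omega) (by omega)
  intro f
  induction f with
  | zero => intro suf pre res _ hf; omega
  | succ f ih =>
    intro pre suf res hps hf
    cases suf with
    | nil =>
      simp only [bOuter]
      rw [if_neg (by rw [← hps]; simp)]
      simp [bPack]
    | cons w rest =>
      have hiN : ((pre.length : Nat) : Int) < N := by rw [hN, ← hps]; simp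
      have hw : PySem.Str.len w ≤ maxLen := hfit w (by rw [← hps]; simp)
      have hdrop : words.drop pre.length = w :: rest := by rw [← hps, List.drop_left]
      -- greedy decomposition
      set m : Nat := (bTakeFit (w :: rest) maxLen).1.length with hm
      have hm1 : 1 ≤ m := by
        rw [hm]
        simp only [bTakeFit, if_pos hw]
        simp
      have hmlen : m ≤ (w :: rest).length := takeFit_len_le _ _
      set grp : List String := (bTakeFit (w :: rest) maxLen).1 with hgrp
      have hgrp_take : grp = (w :: rest).take m := by rw [hgrp, hm, takeFit_take]
      have hgrp_len : grp.length = m := rfl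
      -- bisect result
      have hcond : ((pre.length : Nat) : Int) < ((words.length : Nat) : Int) := by
        rw [hN] at hiN; exact hiN
      simp only [bOuter, if_pos hcond]
      have hTi : PySem.List.pyGetD T ((pre.length : Nat) : Int) 0 = Csum words pre.length := by
        rw [hT, T_get words _ (by positivity) (by omega)]
        simp
      have hCaddone : Csum words (pre.length + 1) = Csum words pre.length + (PySem.Str.len w + 1) := by
        rw [Csum_add, hdrop]
        simp [Csum]
      set bound : Int := PySem.List.pyGetD T ((pre.length : Nat) : Int) 0 + maxLen + 1 with hbound
      have hbis := bisect_go T bound N hmono T.length (((pre.length : Nat) : Int) + 1) N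
        (by positivity) (by omega) (le_refl _) (by rw [hTlen, hN]; omega)
        (by
          have : ((pre.length : Nat) : Int) + 1 = (((pre.length + 1 : Nat)) : Int) := by push_cast; ring
          rw [this, hT, T_get words _ (by positivity) (by rw [← hN]; push_cast; omega)]
          simp only [Int.toNat_natCast]
          rw [hbound, hTi, hCaddone]
          omega)
        (by intro k hk hkN; omega)
      set j : Int := bBisect T bound T.length (((pre.length : Nat) : Int) + 1) N with hj
      obtain ⟨hj_lo, hj_hi, hj_le, hj_gt⟩ := hbis
      -- translate the bisect facts to Csum of the suffix
      set k : Nat := j.toNat - pre.length with hkdef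
      have hjk : j = ((pre.length + k : Nat) : Int) := by push_cast; omega
      have hkn : pre.length + k ≤ words.length := by omega
      have hCk : Csum (w :: rest) k ≤ maxLen + 1 := by
        have := hj_le
        rw [hjk, hT, T_get words _ (by positivity) (by omega)] at this
        simp only [Int.toNat_natCast] at this
        rw [Csum_add, hdrop] at this
        rw [hbound, hTi] at this
        omega
      have hCk1 : pre.length + k < words.length → maxLen + 1 < Csum (w :: rest) (k + 1) := by
        intro hlt
        have := hj_gt (j + 1) (by omega) (by omega)
        rw [hjk] at this
        have e : ((pre.length + k : Nat) : Int) + 1 = ((pre.length + (k + 1) : Nat) : Int) := by push_cast; ring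
        rw [e, hT, T_get words _ (by positivity) (by rw [← hN]; push_cast; omega)] at this
        simp only [Int.toNat_natCast] at this
        rw [Csum_add, hdrop] at this
        rw [hbound, hTi] at this
        omega
      have hk1 : 1 ≤ k := by omega
      have hk_le : k ≤ (w :: rest).length := by
        rw [← hps] at hkn
        simp only [List.length_append] at hkn
        omega
      -- uniqueness: k = m
      obtain ⟨hsa, hsb⟩ := takeFit_spec (w :: rest) maxLen
      rw [← hm] at hsa hsb
      have hCm : Csum (w :: rest) m ≤ maxLen + 1 := by
        rcases hsa with h0 | h
        · omega
        · exact h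
      have hkm : k = m := by
        rcases lt_trichotomy k m with h | h | h
        · exfalso
          have h1 := hCk1 (by
            rw [← hps]
            simp only [List.length_append]
            have := hmlen
            simp only [List.length_cons] at this ⊢
            omega)
          have h2 : Csum (w :: rest) (k + 1) ≤ Csum (w :: rest) m := Csum_mono _ (by omega)
          omega
        · exact h
        · exfalso
          have h1 := hsb (by omega)
          have h2 : Csum (w :: rest) (m + 1) ≤ Csum (w :: rest) k := Csum_mono _ (by omega)
          omega
      -- the slice is the greedy group
      have hslice : PySem.List.slice words (some ((pre.length : Nat) : Int)) (some j) = grp := by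
        rw [hjk]
        have e : ((pre.length + k : Nat) : Int) = ((pre.length : Nat) : Int) + ((k : Nat) : Int) := by push_cast; ring
        rw [e, PySem.List.slice_natCast_add, hdrop, hgrp_take, hkm]
      rw [hslice]
      -- n from the prefix sums is the character count of the group
      have hn_eq : (PySem.List.pyGetD T j 0 - PySem.List.pyGetD T ((pre.length : Nat) : Int) 0) - (j - ((pre.length : Nat) : Int))
          = (grp.map PySem.Str.len).sum := by
        rw [hjk, hT, T_get words _ (by positivity) (by omega)]
        simp only [Int.toNat_natCast]
        rw [Csum_add, hdrop]
        rw [← hT, hTi]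
        have : Csum (w :: rest) k = (grp.map PySem.Str.len).sum + (k : Int) := by
          unfold Csum
          rw [← hkm] at hgrp_take
          rw [← hgrp_take, lenplus_sum, hgrp_len, hkm, ← hkm]
        rw [this]
        push_cast
        ring
      -- the formatted string is jFormat grp maxLen
      have hone : (j - ((pre.length : Nat) : Int) = 1) ↔ (grp.length = 1) := by
        rw [hjk, hgrp_len, ← hkm]
        constructor
        · intro h; omega
        · intro h; push_cast; omega
      have hfmt :
          (if j - ((pre.length : Nat) : Int) = 1 then res ++ [PySem.List.pyGetD grp 0 ""]
           else
             let gaps := j - ((pre.length : Nat) : Int) - 1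
             let n := (PySem.List.pyGetD T j 0 - PySem.List.pyGetD T ((pre.length : Nat) : Int) 0) - (j - ((pre.length : Nat) : Int))
             let times := PySem.Int.floordiv (maxLen - n) gaps
             let extra := PySem.Int.mod (maxLen - n) gaps
             let seps := List.replicate extra.toNat (pvDashes (times + 1))
               ++ List.replicate (gaps - extra).toNat (pvDashes times)
             res ++ [bJoin ((grp.zip seps).map (fun p => p.1 ++ p.2)) ++ PySem.List.pyGetD grp (-1) ""])
          = res ++ [jFormat grp maxLen] := by
        by_cases h1 : grp.length = 1
        · rw [if_pos (hone.mpr h1)]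
          simp [jFormat, h1]
        · rw [if_neg (fun hc => h1 (hone.mp hc))]
          have hgaps_eq : j - ((pre.length : Nat) : Int) - 1 = (grp.length : Int) - 1 := by
            rw [hjk, hgrp_len, ← hkm]; push_cast; ring
          simp only [hn_eq, hgaps_eq]
          have hL2 : 2 ≤ grp.length := by
            have := hgrp_len
            omega
          set gaps : Int := (grp.length : Int) - 1 with hgaps
          set n := (grp.map PySem.Str.len).sum with hnn
          set times := PySem.Int.floordiv (maxLen - n) gaps with htimes
          set extra := PySem.Int.mod (maxLen - n) gaps with hextra
          have hgaps_pos : 0 < gaps := by rw [hgaps]; omega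
          have hex0 : 0 ≤ extra := PySem.Int.mod_nonneg _ hgaps_pos
          have hexlt : extra < gaps := PySem.Int.mod_lt _ hgaps_pos
          -- decompose grp
          have hgne : grp ≠ [] := by intro h; rw [h] at hL2; simp at hL2
          obtain ⟨ys, z, hyz⟩ : ∃ ys z, grp = ys ++ [z] :=
            ⟨grp.dropLast, grp.getLast hgne, by simp [List.dropLast_append_getLast hgne]⟩
          have hys_len : (ys.length : Int) = gaps := by
            rw [hgaps, hyz]; simp
          have hseps : List.replicate extra.toNat (pvDashes (times + 1))
              ++ List.replicate (gaps - extra).toNat (pvDashes times)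
              = (List.range ys.length).map (fun (k : Nat) => pvDashes (times + if (k : Int) < extra then 1 else 0)) := by
            rw [← hys_len] at hexlt ⊢
            rw [← seps_eq ys.length times extra hex0 (by omega)]
          rw [hseps]
          have hzip : (grp.zip ((List.range ys.length).map (fun (k : Nat) => pvDashes (times + if (k : Int) < extra then 1 else 0)))).map (fun p => p.1 ++ p.2)
              = (ys.zipIdx).map (fun p => p.1 ++ pvDashes (times + if (p.2 : Int) < extra then 1 else 0)) := by
            rw [hyz]
            have elen : ys.length = ((List.range ys.length).map (fun (k : Nat) => pvDashes (times + if (k : Int) < extra then 1 else 0))).length := by simp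
            conv_lhs => rw [show (List.range ys.length).map (fun (k : Nat) => pvDashes (times + if (k : Int) < extra then 1 else 0))
                = ((List.range ys.length).map (fun (k : Nat) => pvDashes (times + if (k : Int) < extra then 1 else 0))) ++ [] by simp]
            rw [List.zip_append (by simpa using elen.symm ▸ rfl)]
            simp only [List.zip_nil_right, List.append_nil]
            exact zipjoin ys _
          rw [hzip]
          simp only [jFormat, if_neg h1]
          rw [hyz]
          simp only [List.dropLast_concat]
          rw [← hyz, ← hnn, ← hgaps, ← htimes, ← hextra]
      rw [hfmt]
      -- recurse
      have hpk : bPack (w :: rest) maxLen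
          = grp :: bPack (bTakeFit (w :: rest) maxLen).2 maxLen := by
        conv_lhs => rw [bPack.eq_def]
        simp only [bTakeFit, if_pos hw, hgrp]
      have hrest : (pre ++ grp) ++ (bTakeFit (w :: rest) maxLen).2 = words := by
        rw [List.append_assoc, hgrp, bTakeFit_append, hps]
      have hlen2 : (bTakeFit (w :: rest) maxLen).2.length < f := by
        rw [takeFit_drop]
        simp only [List.length_drop]
        simp only [List.length_cons] at hf ⊢
        omega
      have hrec := ih (pre ++ grp) (bTakeFit (w :: rest) maxLen).2 (res ++ [jFormat grp maxLen]) hrest hlen2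
      have hplen : (((pre ++ grp).length : Nat) : Int) = j := by
        rw [hjk]
        simp [hgrp_len, hkm]
      rw [hplen] at hrec
      rw [hrec, hpk]
      simp

-- ===== VERDICT (by name: the statement is the Claim_ definition above) =====
theorem reflowAndJustify_spec : Claim_equal_reflowAndJustify := by
  intro lines maxLen _ hpre
  unfold Spec_reflowAndJustify reflowAndJustify reflowAndJustify_alt
  cases lines with
  | nil => simp
  | cons l0 rest =>
    simp only [reduceCtorEq, if_false, words_eq]
    have hflat : (l0 :: rest).foldl (fun acc l => acc ++ pvSplitSpace l) []
        = (l0 :: rest).flatMap pvSplitSpace := by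
      simpa using PySem.List.foldl_append_eq_flatMap pvSplitSpace (l0 :: rest) []
    rw [hflat]
    set words := (l0 :: rest).flatMap pvSplitSpace with hwords
    have hfit : ∀ w ∈ words, PySem.Str.len w ≤ maxLen := by
      intro w hw
      rw [hwords] at hw
      simp only [List.mem_flatMap] at hw
      obtain ⟨l, hl, hwl⟩ := hw
      exact hpre l hl w hwl
    -- A side
    have hA := outer_eq maxLen (words.length + 1) words [] [] hfit (Nat.lt_succ_self _)
    simp only [List.nil_append, List.length_nil, Nat.cast_zero] at hA
    rw [hA]
    -- B side
    rw [T_build]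
    have hB := bOuter_eq words maxLen hfit (words.length + 1) [] words [] rfl (Nat.lt_succ_self _)
    simp only [List.length_nil, Nat.cast_zero, List.nil_append] at hB
    rw [hB]
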